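-- pv_equiv track=rewrite | github.com/EthanKalika/StevensClasses | CS115IntrotoPython/GroupProject_MusicRecommender/GroupProject/UnfinishedPrototypes/musicrecplus (1).py | create_counter_list
-- ===== SOURCE A (Python) =====
-- def standard_sort_list(L):
--     """ Sort an input list of artists in alphabetical order with the first letter capitalized."""
--     sortedL=[]
--     for item in L:
--         sortedL.append(item.strip().title())
--         sortedL.sort()
--     return sortedL
--
-- def create_total_artists_list(publicDictionary):
--     publicDictionary_keys = list(publicDictionary.keys())
--     total_artists_list = []
--     for key in publicDictionary_keys:
--         values = publicDictionary[key]
--         for val in values: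
--             if val not in total_artists_list:
--                 total_artists_list += [val]
--
--     total_artists_list = standard_sort_list(total_artists_list)
--     return total_artists_list
--
-- def create_counter_list(publicDictionary):
--     """ Make a list of the number of times users selected each artist in standard order."""
--     counter_list = []
--     total_artists_list = create_total_artists_list(publicDictionary)
--     publicDictionary_keys = list(publicDictionary.keys())
--     for artist in total_artists_list:
--         count = 0
--         for key in publicDictionary_keys:
--             artist_list = publicDictionary[key]
--             if artist in artist_list:
--                 count += 1
--         counter_list += [count]
--     return counter_list
-- ===== SOURCE B (Python) =====
-- def create_counter_list(publicDictionary):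
--     """Make a list of the number of times users selected each artist in standard order.
--
--     A user selects an artist when the artist's standard (stripped, title-cased)
--     name appears in that user's list; each user contributes at most one to an
--     artist's tally.
--     """
--     names_seen = {name for names in publicDictionary.values() for name in names}
--     artists = sorted(name.strip().title() for name in names_seen)
--     counts = {artist: 0 for artist in artists}
--     for names in publicDictionary.values():
--         for name in set(names):
--             if name in counts:
--                 counts[name] += 1
--     return [counts[artist] for artist in artists]
-- ===== Notes on version B (the rewrite author's own statement) =====
-- stated objective: faster
-- what changed: A rescans every user's list once per distinct artist and re-sorts the artist list after every single append; B collects the distinct names in one pass, sorts the standardized names once, seeds a zero tally per artist and fills all tallies in a single counting pass over the users. Pre_ excludes association lists with duplicate keys, which do not represent any Python dict.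
import Mathlib
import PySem

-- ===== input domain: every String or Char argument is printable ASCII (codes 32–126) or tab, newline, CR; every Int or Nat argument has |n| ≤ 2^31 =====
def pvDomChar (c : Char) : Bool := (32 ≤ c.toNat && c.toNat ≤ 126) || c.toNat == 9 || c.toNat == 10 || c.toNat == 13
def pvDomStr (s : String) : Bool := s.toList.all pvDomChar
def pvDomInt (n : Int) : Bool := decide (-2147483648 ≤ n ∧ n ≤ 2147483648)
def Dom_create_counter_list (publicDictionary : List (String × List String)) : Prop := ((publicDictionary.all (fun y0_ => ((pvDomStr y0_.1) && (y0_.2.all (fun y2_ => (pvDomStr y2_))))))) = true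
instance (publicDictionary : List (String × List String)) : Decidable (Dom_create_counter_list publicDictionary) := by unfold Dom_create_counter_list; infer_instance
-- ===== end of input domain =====

-- B collects the distinct names once, sorts the standardized names once, and fills a pre-seeded tally dict in a single pass over the users, instead of A's per-artist rescan of every list with a re-sort after every append (faster).

-- ===== PORT A =====
-- hand port of str.title() (PySem has none): a letter is uppercased after a non-letter and
-- lowercased otherwise; exact on the printable-ASCII domain, where the cased characters are
-- exactly the letters. Used by both ports (both Pythons call .strip().title()).
def pyTitleChars : List Char → Bool → List Char
  | [], _ => []
  | c :: cs, prevAlpha =>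
    (if PySem.Chars.isalpha c then
       (if prevAlpha then PySem.Chars.lowerChar c else PySem.Chars.upperChar c)
     else c) :: pyTitleChars cs (PySem.Chars.isalpha c)

def pyTitle (s : String) : String := String.ofList (pyTitleChars s.toList false)

def standard_sort_list (L : List String) : List String :=
  L.foldl (fun sortedL item =>
    PySem.List.sorted (sortedL ++ [pyTitle (PySem.Str.strip item)]) (fun x => x) false) []

def create_total_artists_list (publicDictionary : List (String × List String)) : List String :=
  let d := PySem.Dict.mk publicDictionary
  let publicDictionary_keys := d.keys
  let total_artists_list :=
    publicDictionary_keys.foldl (fun tal key =>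
      (d.getD key []).foldl (fun tal val => if val ∈ tal then tal else tal ++ [val]) tal) []
  standard_sort_list total_artists_list

def create_counter_list (publicDictionary : List (String × List String)) : List Int :=
  let d := PySem.Dict.mk publicDictionary
  let total_artists_list := create_total_artists_list publicDictionary
  let publicDictionary_keys := d.keys
  total_artists_list.foldl (fun counter_list artist =>
    counter_list ++ [publicDictionary_keys.foldl
      (fun count key => if artist ∈ d.getD key [] then count + 1 else count) (0 : Int)]) []

-- ===== PORT B =====
def create_counter_list_alt (publicDictionary : List (String × List String)) : List Int :=
  let d := PySem.Dict.mk publicDictionary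
  let names_seen : PySem.Set String :=
    PySem.Set.ofList (d.values.flatMap (fun names => names))
  let artists :=
    PySem.List.sorted (names_seen.map (fun name => pyTitle (PySem.Str.strip name))) (fun x => x) false
  let counts0 : PySem.Dict String Int :=
    artists.foldl (fun counts artist => counts.insert artist 0) PySem.Dict.empty
  let counts :=
    d.values.foldl (fun counts names =>
      (PySem.Set.ofList names).foldl (fun counts name =>
        if counts.contains name then counts.insert name (counts.getD name 0 + 1) else counts) counts)
      counts0
  artists.map (fun artist => counts.getD artist 0)

-- ===== PRECONDITION & SPEC =====
-- Pre_ excludes association lists with duplicate keys: the Python parameter is a dict, whose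
-- keys are necessarily unique, so such lists do not represent any Python input.
def Pre_create_counter_list (publicDictionary : List (String × List String)) : Prop :=
  (publicDictionary.map Prod.fst).Nodup
instance (publicDictionary : List (String × List String)) : Decidable (Pre_create_counter_list publicDictionary) := by unfold Pre_create_counter_list; infer_instance

def pvWitness_create_counter_list : (List (String × List String)) :=
  [("u1", ["B", "A"]), ("u2", ["A", "A"])]

def Spec_create_counter_list (publicDictionary : List (String × List String)) (out : List Int) : Prop := out = create_counter_list_alt publicDictionary
instance (publicDictionary : List (String × List String)) (out : List Int) : Decidable (Spec_create_counter_list publicDictionary out) := by unfold Spec_create_counter_list; infer_instance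

-- ===== CLAIM (what is proved, stated in full; the proofs are below) =====
def Claim_equal_create_counter_list : Prop := ∀ (publicDictionary : List (String × List String)), Dom_create_counter_list publicDictionary → Pre_create_counter_list publicDictionary → Spec_create_counter_list publicDictionary (create_counter_list publicDictionary)

-- ===== LEMMAS AND PROOFS =====

-- A's inner dedup fold is PySem.Set.update
theorem inner_fold_eq_update (tal : List String) (vs : List String) :
    vs.foldl (fun tal val => if val ∈ tal then tal else tal ++ [val]) tal
    = PySem.Set.update tal vs := by
  simp only [PySem.Set.update]
  refine PySem.List.foldl_congr_mem vs _ _ tal ?_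
  intro acc x _
  exact (PySem.Set.add_eq_ite acc x).symm

-- A's dedup loop over the dict, with unique keys, is the same set-update loop over the value lists
theorem totalA_aux (pd : List (String × List String)) (hnd : (pd.map Prod.fst).Nodup)
    (acc : List String) :
    (pd.map Prod.fst).foldl (fun tal key => PySem.Set.update tal ((PySem.Dict.mk pd).getD key [])) acc
    = (pd.map Prod.snd).foldl (fun tal vs => PySem.Set.update tal vs) acc := by
  induction pd generalizing acc with
  | nil => rfl
  | cons hd tl ih =>
    obtain ⟨k, v⟩ := hd
    simp only [List.map_cons, List.foldl_cons]
    have h1 : (PySem.Dict.mk ((k, v) :: tl)).getD k [] = v := by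
      simp [PySem.Dict.getD_eq_get?_getD, PySem.Dict.get?_mk_cons]
    have hk : k ∉ tl.map Prod.fst := (List.nodup_cons.mp hnd).1
    rw [h1]
    have hcg := PySem.List.foldl_congr_mem (l := tl.map Prod.fst) (init := PySem.Set.update acc v)
      (f := fun tal key => PySem.Set.update tal ((PySem.Dict.mk ((k, v) :: tl)).getD key []))
      (g := fun tal key => PySem.Set.update tal ((PySem.Dict.mk tl).getD key []))
      (by
        intro a key hkey
        have hne : k ≠ key := fun h => hk (h ▸ hkey)
        simp [PySem.Dict.getD_eq_get?_getD, PySem.Dict.get?_mk_cons, hne])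
    rw [hcg]
    exact ih (List.nodup_cons.mp hnd).2 _

-- a set-update loop over a list of lists updates with the flattened list
theorem update_fold_eq_flat (L : List (List String)) (s : PySem.Set String) :
    L.foldl (fun t vs => PySem.Set.update t vs) s
    = PySem.Set.update s (L.flatMap (fun names => names)) := by
  induction L generalizing s with
  | nil => simp [PySem.Set.update]
  | cons vs L ih =>
    simp only [List.foldl_cons, List.flatMap_cons]
    rw [ih, PySem.Set.update_append]

-- A's sort-after-each-append loop is a single sort of the mapped list
theorem standard_sort_list_eq (L : List String) :
    standard_sort_list L
    = PySem.List.sorted (L.map (fun item => pyTitle (PySem.Str.strip item))) (fun x => x) false := by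
  induction L using List.reverseRecOn with
  | nil => rfl
  | append_singleton L x ih =>
    simp only [standard_sort_list, List.foldl_append, List.foldl_cons, List.foldl_nil] at *
    rw [ih, List.map_append]
    exact PySem.List.sorted_eq_sorted_of_perm _ _ _ Function.injective_id
      ((PySem.List.sorted_perm _ _ _).append_right _)

-- A's per-artist scan, with unique keys, counts the value lists containing the artist
theorem countA_keys (pd : List (String × List String)) (hnd : (pd.map Prod.fst).Nodup) (artist : String) :
    (pd.map Prod.fst).countP (fun key => decide (artist ∈ (PySem.Dict.mk pd).getD key []))
    = (pd.map Prod.snd).countP (fun vs => decide (artist ∈ vs)) := by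
  induction pd with
  | nil => rfl
  | cons hd tl ih =>
    obtain ⟨k, v⟩ := hd
    simp only [List.map_cons, List.countP_cons]
    have h1 : (PySem.Dict.mk ((k, v) :: tl)).getD k [] = v := by
      simp [PySem.Dict.getD_eq_get?_getD, PySem.Dict.get?_mk_cons]
    have hk : k ∉ tl.map Prod.fst := (List.nodup_cons.mp hnd).1
    have h2 : (tl.map Prod.fst).countP (fun key => decide (artist ∈ (PySem.Dict.mk ((k, v) :: tl)).getD key []))
        = (tl.map Prod.fst).countP (fun key => decide (artist ∈ (PySem.Dict.mk tl).getD key [])) := by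
      apply List.countP_congr
      intro key hkey
      have hne : k ≠ key := fun h => hk (h ▸ hkey)
      simp [PySem.Dict.getD_eq_get?_getD, PySem.Dict.get?_mk_cons, hne]
    rw [h1, h2, ih (List.nodup_cons.mp hnd).2]

theorem count_set_ofList (vs : List String) (t : String) :
    (PySem.Set.ofList vs).count t = if t ∈ vs then 1 else 0 := by
  by_cases h : t ∈ vs
  · rw [List.count_eq_one_of_mem (PySem.Set.nodup_ofList vs) ((PySem.Set.mem_ofList vs t).mpr h)]
    simp [h]
  · rw [List.count_eq_zero.mpr (fun hm => h ((PySem.Set.mem_ofList vs t).mp hm))]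
    simp [h]

-- B's seeding loop gives every key the tally 0
theorem seed_getD (l : List String) (c : PySem.Dict String Int) (a : String)
    (h : c.getD a 0 = 0) :
    (l.foldl (fun c x => c.insert x (0 : Int)) c).getD a 0 = 0 := by
  induction l generalizing c with
  | nil => exact h
  | cons x l ih =>
    simp only [List.foldl_cons]
    refine ih _ ?_
    by_cases hx : a = x
    · subst hx; rw [PySem.Dict.getD_insert_self]
    · rw [PySem.Dict.getD_insert]
      simp [hx, h]

-- B's guarded counting loop over one distinct-name list: a present key's tally grows by its count
theorem inner_count (l : List String) (c : PySem.Dict String Int) (a : String)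
    (h : c.contains a = true) :
    ((l.foldl (fun c name =>
        if c.contains name then c.insert name (c.getD name 0 + 1) else c) c).getD a 0
      = c.getD a 0 + (l.count a : Int))
    ∧ (l.foldl (fun c name =>
        if c.contains name then c.insert name (c.getD name 0 + 1) else c) c).contains a = true := by
  induction l generalizing c with
  | nil => simp [h]
  | cons x l ih =>
    simp only [List.foldl_cons, List.count_cons]
    by_cases hx : x = a
    · subst hx
      rw [h]
      simp only [if_true]
      obtain ⟨h1, h2⟩ := ih (c.insert x (c.getD x 0 + 1)) (by rw [PySem.Dict.contains_insert_self])
      refine ⟨?_, h2⟩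
      rw [h1, PySem.Dict.getD_insert_self]
      simp
      ring
    · have hne : a ≠ x := fun e => hx e.symm
      by_cases hg : c.contains x
      · obtain ⟨h1, h2⟩ := ih (c.insert x (c.getD x 0 + 1))
          (by rw [PySem.Dict.contains_insert]; simp [h])
        rw [hg]
        simp only [if_true]
        refine ⟨?_, h2⟩
        rw [h1, PySem.Dict.getD_insert]
        simp [hne, hx]
      · obtain ⟨h1, h2⟩ := ih c h
        simp only [hg]
        simp only [Bool.false_eq_true, if_false]
        refine ⟨?_, h2⟩
        rw [h1]
        simp [hx]

-- B's counting pass over all users: a present key's tally is the number of lists containing it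
theorem outer_count (vls : List (List String)) (c : PySem.Dict String Int) (a : String)
    (h : c.contains a = true) :
    (vls.foldl (fun counts names =>
        (PySem.Set.ofList names).foldl (fun counts name =>
          if counts.contains name then counts.insert name (counts.getD name 0 + 1) else counts) counts)
      c).getD a 0
    = c.getD a 0 + (vls.countP (fun vs => decide (a ∈ vs)) : Int) := by
  induction vls generalizing c with
  | nil => simp
  | cons vs vls ih =>
    simp only [List.foldl_cons, List.countP_cons]
    obtain ⟨h1, h2⟩ := inner_count (PySem.Set.ofList vs) c a h
    rw [ih _ h2, h1, count_set_ofList]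
    by_cases hm : a ∈ vs <;> simp [hm]
    ring

-- ===== VERDICT (by name: the statement is the Claim_ definition above) =====
theorem create_counter_list_spec : Claim_equal_create_counter_list := by
  intro pd _ hpre
  unfold Pre_create_counter_list at hpre
  unfold Spec_create_counter_list create_counter_list create_counter_list_alt create_total_artists_list
  simp only [PySem.Dict.keys_mk, PySem.Dict.values_mk]
  rw [show (fun (x : String × List String) => x.1) = Prod.fst from rfl,
    show (fun (x : String × List String) => x.2) = Prod.snd from rfl]
  -- A's dedup fold becomes the set-update fold over the value lists
  have htot : (pd.map Prod.fst).foldl (fun tal key =>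
        ((PySem.Dict.mk pd).getD key []).foldl
          (fun tal val => if val ∈ tal then tal else tal ++ [val]) tal) []
      = (pd.map Prod.snd).foldl (fun tal vs => PySem.Set.update tal vs) [] := by
    have h := PySem.List.foldl_congr_mem (l := pd.map Prod.fst) (init := ([] : List String))
      (f := fun tal key => ((PySem.Dict.mk pd).getD key []).foldl
          (fun tal val => if val ∈ tal then tal else tal ++ [val]) tal)
      (g := fun tal key => PySem.Set.update tal ((PySem.Dict.mk pd).getD key []))
      (by intro a key _; exact inner_fold_eq_update a _)
    rw [h]
    exact totalA_aux pd hpre []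
  -- the deduplicated raw names are the same on both sides
  have hflat : (pd.map Prod.snd).foldl (fun tal vs => PySem.Set.update tal vs) []
      = PySem.Set.ofList ((pd.map Prod.snd).flatMap (fun names => names)) := by
    rw [update_fold_eq_flat, PySem.Set.ofList_eq_foldl, PySem.Set.update]
  rw [htot, standard_sort_list_eq, hflat, PySem.List.foldl_append_singleton_eq_map, List.nil_append]
  apply List.map_congr_left
  intro artist hart
  -- A's side: the per-artist scan counts, over the keys, the lists containing the artist
  rw [PySem.List.foldl_ite_add_one (fun key => artist ∈ (PySem.Dict.mk pd).getD key []) (pd.map Prod.fst) 0,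
    countA_keys pd hpre artist]
  -- B's side: the seeded tally at a listed artist is the same count
  have hcont : ((PySem.List.sorted
        ((PySem.Set.ofList ((pd.map Prod.snd).flatMap (fun names => names))).map
          (fun name => pyTitle (PySem.Str.strip name))) (fun x => x) false).foldl
      (fun counts a => counts.insert a (0 : Int)) PySem.Dict.empty).contains artist = true := by
    rw [PySem.Dict.contains_iff_mem_keys, PySem.Dict.keys_foldl_insert _ (fun _ _ => (0 : Int)),
      PySem.Dict.keys_empty]
    exact (PySem.Set.mem_update [] _ artist).mpr (Or.inr hart)
  rw [outer_count _ _ _ hcont,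
    seed_getD _ PySem.Dict.empty artist (by rw [PySem.Dict.getD_empty])]
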